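-- pv_equiv track=rewrite | github.com/Khubaib14/Leetcode | 1544-make-the-string-great/1544-make-the-string-great.py | firstOne
-- ===== SOURCE A (Python) =====
-- def firstOne(s: str):
--     stack = []
--
--     for i in s:
--         if stack and ((ord(i) - ord(stack[-1]) == 32) or (ord(stack[-1]) - ord(i) == 32)):
--             stack.pop()
--         else:
--             stack.append(i)
--
--     return "".join(stack)
-- ===== SOURCE B (Python) =====
-- def firstOne(s: str):
--     # Repeatedly delete the leftmost adjacent pair whose ords differ by 32,
--     # until no such pair remains (the reduction is confluent, so this equals
--     # the one-pass stack reduction).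
--     lst = list(s)
--     while True:
--         found = False
--         for i in range(len(lst) - 1):
--             if abs(ord(lst[i]) - ord(lst[i + 1])) == 32:
--                 del lst[i:i + 2]
--                 found = True
--                 break
--         if not found:
--             return "".join(lst)
-- ===== Notes on version B (the rewrite author's own statement) =====
-- stated objective: alternative
-- what changed: Replaced A's single left-to-right pass with an explicit stack by repeated scanning: delete the leftmost adjacent pair whose ords differ by 32 and restart until no such pair remains (equal by confluence of the cancellation).
import Mathlib
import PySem

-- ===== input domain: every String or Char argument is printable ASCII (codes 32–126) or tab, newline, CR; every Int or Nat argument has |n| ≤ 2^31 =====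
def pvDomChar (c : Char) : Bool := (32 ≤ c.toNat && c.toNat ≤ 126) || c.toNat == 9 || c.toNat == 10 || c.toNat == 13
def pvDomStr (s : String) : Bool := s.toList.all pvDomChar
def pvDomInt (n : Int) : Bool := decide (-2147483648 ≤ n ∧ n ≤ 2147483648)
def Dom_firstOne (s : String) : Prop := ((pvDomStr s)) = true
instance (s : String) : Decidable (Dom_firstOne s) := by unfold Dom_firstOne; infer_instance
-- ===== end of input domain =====

-- B replaces A's one-pass stack with repeated leftmost-pair deletion until stable
-- (objective: alternative decomposition; same return value, no speed claim).

-- ===== PORT A =====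
-- Python A's test: (ord(i) - ord(stack[-1]) == 32) or (ord(stack[-1]) - ord(i) == 32)
def pvMatchA (top i : Char) : Bool :=
  ((i.toNat : Int) - (top.toNat : Int) == 32) || ((top.toNat : Int) - (i.toNat : Int) == 32)

-- one iteration of A's for-loop body; the getLastD default is guarded by stack ≠ []
def pvStepA (stack : List Char) (i : Char) : List Char :=
  if stack ≠ [] ∧ pvMatchA (stack.getLastD ' ') i = true then
    stack.dropLast
  else
    stack ++ [i]

def firstOne (s : String) : String :=
  String.ofList (s.toList.foldl pvStepA [])

-- ===== PORT B =====
-- Python B's test: abs(ord(lst[i]) - ord(lst[i+1])) == 32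
def pvMatchB (a b : Char) : Bool :=
  ((a.toNat : Int) - (b.toNat : Int)).natAbs == 32

-- the inner for-loop of Source B: find the leftmost adjacent matching pair, delete it
-- (`none` = the pass found no pair, i.e. `found` stays False)
def pvScan : List Char → Option (List Char)
  | a :: b :: rest =>
      if pvMatchB a b then some rest
      else (pvScan (b :: rest)).map (a :: ·)
  | _ => none

theorem pvScan_length : ∀ (xs ys : List Char), pvScan xs = some ys → ys.length + 2 = xs.length := by
  intro xs
  induction xs with
  | nil => intro ys h; simp [pvScan] at h
  | cons a t ih =>
    cases t with
    | nil => intro ys h; simp [pvScan] at h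
    | cons b rest =>
      intro ys h
      by_cases hm : pvMatchB a b
      · simp [pvScan, hm] at h; subst h; simp
      · rw [show pvScan (a :: b :: rest) = (pvScan (b :: rest)).map (a :: ·) from by
          simp [pvScan, hm]] at h
        rw [Option.map_eq_some_iff] at h
        obtain ⟨zs, hz, rfl⟩ := h
        have := ih zs hz
        simp at this ⊢
        omega

-- the outer while-loop of Source B: repeat until no pair is found
def pvLoop (xs : List Char) : List Char :=
  match h : pvScan xs with
  | some ys => pvLoop ys
  | none => xs
termination_by xs.length
decreasing_by
  have := pvScan_length xs ys h
  omega

def firstOne_alt (s : String) : String :=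
  String.ofList (pvLoop s.toList)

-- ===== PRECONDITION & SPEC =====
def Spec_firstOne (s : String) (out : String) : Prop := out = firstOne_alt s
instance (s : String) (out : String) : Decidable (Spec_firstOne s out) := by unfold Spec_firstOne; infer_instance

-- ===== CLAIM (what is proved, stated in full; the proofs are below) =====
def Claim_equal_firstOne : Prop := ∀ (s : String), Dom_firstOne s → Spec_firstOne s (firstOne s)

-- ===== LEMMAS AND PROOFS =====

-- the two match tests agree
theorem pvMatch_eq (a b : Char) : pvMatchA a b = pvMatchB a b := by
  simp only [pvMatchA, pvMatchB]
  rw [Bool.eq_iff_iff]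
  simp only [Bool.or_eq_true, beq_iff_eq, Int.natAbs_eq_iff]
  omega

-- pvMatchB is symmetric
theorem pvMatchB_comm (a b : Char) : pvMatchB a b = pvMatchB b a := by
  simp only [pvMatchB]
  congr 1
  omega

-- a top-first version of A's step; easier to reason about
def pvStep (st : List Char) (c : Char) : List Char :=
  match st with
  | t :: r => if pvMatchB t c then r else c :: t :: r
  | [] => [c]

theorem pvStepA_eq (st : List Char) (c : Char) :
    pvStepA st c = (pvStep st.reverse c).reverse := by
  induction st using List.reverseRecOn with
  | nil => simp [pvStepA, pvStep]
  | append_singleton init t _ =>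
    simp only [pvStepA, pvStep, List.reverse_append, List.reverse_cons, List.reverse_nil,
      List.nil_append, List.cons_append, List.getLastD_concat, pvMatch_eq,
      pvMatchB_comm t c]
    by_cases h : pvMatchB c t = true
    · simp [h]
    · simp [h]

theorem foldlA_eq (xs : List Char) : ∀ (st : List Char),
    xs.foldl pvStepA st = (xs.foldl pvStep st.reverse).reverse := by
  induction xs with
  | nil => intro st; simp
  | cons c t ih =>
    intro st
    simp only [List.foldl_cons, pvStepA_eq]
    rw [ih]
    simp

-- no adjacent matching pair
def pvNoAdj : List Char → Prop
  | a :: b :: rest => pvMatchB a b = false ∧ pvNoAdj (b :: rest)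
  | _ => True

-- head of the stack vs head of the remaining input: they never match
def pvOk (st xs : List Char) : Prop :=
  match st, xs with
  | t :: _, c :: _ => pvMatchB t c = false
  | _, _ => True

-- if nothing adjacent matches (including against the stack top), the stack just pushes
theorem foldl_noAdj : ∀ (u st : List Char), pvNoAdj u → pvOk st u →
    u.foldl pvStep st = u.reverse ++ st := by
  intro u
  induction u with
  | nil => intro st _ _; simp
  | cons c t ih =>
    intro st hna hok
    have hstep : pvStep st c = c :: st := by
      cases st with
      | nil => rfl
      | cons x r => simp only [pvOk] at hok; simp [pvStep, hok]
    simp only [List.foldl_cons, hstep]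
    have hna' : pvNoAdj t := by
      cases t with
      | nil => trivial
      | cons b rest => exact hna.2
    have hok' : pvOk (c :: st) t := by
      cases t with
      | nil => trivial
      | cons b rest => exact hna.1
    rw [ih (c :: st) hna' hok']
    simp

-- when pvScan finds no pair, the list has no adjacent matching pair
theorem pvScan_none : ∀ (xs : List Char), pvScan xs = none → pvNoAdj xs := by
  intro xs
  induction xs with
  | nil => intro _; trivial
  | cons a t ih =>
    cases t with
    | nil => intro _; trivial
    | cons b rest =>
      intro h
      by_cases hm : pvMatchB a b
      · simp [pvScan, hm] at h
      · rw [show pvScan (a :: b :: rest) = (pvScan (b :: rest)).map (a :: ·) from by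
          simp [pvScan, hm]] at h
        rw [Option.map_eq_none_iff] at h
        exact ⟨by simpa using hm, ih h⟩

-- deleting the leftmost matching pair does not change the stack result
theorem pvScan_foldl : ∀ (xs st ys : List Char), pvScan xs = some ys → pvOk st xs →
    xs.foldl pvStep st = ys.foldl pvStep st := by
  intro xs
  induction xs with
  | nil => intro st ys h; simp [pvScan] at h
  | cons a t ih =>
    cases t with
    | nil => intro st ys h; simp [pvScan] at h
    | cons b rest =>
      intro st ys h hok
      have hpush : pvStep st a = a :: st := by
        cases st with
        | nil => rfl
        | cons x r => simp only [pvOk] at hok; simp [pvStep, hok]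
      by_cases hm : pvMatchB a b
      · simp only [pvScan, hm, if_pos, Option.some_inj] at h
        subst h
        simp only [List.foldl_cons, hpush]
        have : pvStep (a :: st) b = st := by simp [pvStep, hm]
        rw [this]
      · rw [show pvScan (a :: b :: rest) = (pvScan (b :: rest)).map (a :: ·) from by
          simp [pvScan, hm]] at h
        rw [Option.map_eq_some_iff] at h
        obtain ⟨zs, hz, rfl⟩ := h
        simp only [List.foldl_cons, hpush]
        refine ih (a :: st) zs hz ?_
        simpa [pvOk] using hm

-- the loop preserves the stack result, and ends in a scan-free list
theorem pvLoop_foldl (xs : List Char) :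
    (pvLoop xs).foldl pvStep [] = xs.foldl pvStep [] ∧ pvScan (pvLoop xs) = none := by
  induction xs using pvLoop.induct with
  | case1 xs ys h ih =>
    rw [pvLoop, h]
    refine ⟨?_, ih.2⟩
    rw [ih.1, pvScan_foldl xs [] ys h trivial]
  | case2 xs h =>
    rw [pvLoop, h]
    exact ⟨rfl, h⟩

theorem main_eq (xs : List Char) : xs.foldl pvStepA [] = pvLoop xs := by
  rw [foldlA_eq, List.reverse_nil]
  obtain ⟨h1, h2⟩ := pvLoop_foldl xs
  rw [← h1, foldl_noAdj (pvLoop xs) [] (pvScan_none _ h2) trivial]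
  simp

-- ===== VERDICT (by name: the statement is the Claim_ definition above) =====
theorem firstOne_spec : Claim_equal_firstOne := by
  intro s _
  unfold Spec_firstOne firstOne firstOne_alt
  rw [main_eq]
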